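-- pv_equiv track=rewrite | github.com/VindereYnetis/Calendar | Calendar.py | sumMonth
-- ===== SOURCE A (Python) =====
-- def sumMonth(month):
--     i = 1
--     month += 1
--     result = 0
--     for i in range(month):
--         if (month < 10):
--             result += i
--         else: result += (i // 10) + (i % 10)
--     return result
-- ===== SOURCE B (Python) =====
-- def sumMonth(month):
--     n = month + 1
--     if n <= 0:
--         return 0
--     if n < 10:
--         return n * (n - 1) // 2
--     q, r = divmod(n, 10)
--     # sum_{i<n} i%10 = 45*q + r*(r-1)//2 ; sum_{i<n} i//10 = 10*q*(q-1)//2 + q*r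
--     return 45 * q + 5 * q * (q - 1) + q * r + r * (r - 1) // 2
-- ===== Notes on version B (the rewrite author's own statement) =====
-- stated objective: faster
-- what changed: Removes A's accumulation loop entirely: B computes the result in constant time from closed-form arithmetic — the triangular-number formula for the small-month branch, and for the large-month branch an exact polynomial in the quotient and remainder of divmod(month+1, ten), obtained by summing the quotient digits and remainder digits separately.
import Mathlib
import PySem

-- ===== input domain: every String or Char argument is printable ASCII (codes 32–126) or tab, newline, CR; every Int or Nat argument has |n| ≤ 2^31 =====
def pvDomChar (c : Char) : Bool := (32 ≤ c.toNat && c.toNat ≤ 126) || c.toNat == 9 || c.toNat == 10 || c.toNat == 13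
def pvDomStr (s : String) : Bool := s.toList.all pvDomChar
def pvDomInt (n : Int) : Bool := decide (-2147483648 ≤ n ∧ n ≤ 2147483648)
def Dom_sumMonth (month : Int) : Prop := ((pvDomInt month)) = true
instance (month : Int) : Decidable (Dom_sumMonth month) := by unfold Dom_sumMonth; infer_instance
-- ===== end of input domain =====

-- B replaces A's O(n) accumulation loop by closed-form arithmetic (derived by summing i%10 and i//10 separately).
-- ===== PORT A =====
def sumMonth (month : Int) : Int :=
  let month := month + 1
  (PySem.List.pyRange 0 month 1).foldl
    (fun result i =>
      if month < 10 then result + i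
      else result + (PySem.Int.floordiv i 10 + PySem.Int.mod i 10)) 0

-- ===== PORT B =====
def sumMonth_alt (month : Int) : Int :=
  let n := month + 1
  if n ≤ 0 then 0
  else if n < 10 then PySem.Int.floordiv (n * (n - 1)) 2
  else
    let q := PySem.Int.floordiv n 10
    let r := PySem.Int.mod n 10
    45 * q + 5 * q * (q - 1) + q * r + PySem.Int.floordiv (r * (r - 1)) 2

-- ===== PRECONDITION & SPEC =====
def Spec_sumMonth (month : Int) (out : Int) : Prop := out = sumMonth_alt month
instance (month : Int) (out : Int) : Decidable (Spec_sumMonth month out) := by unfold Spec_sumMonth; infer_instance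

-- ===== CLAIM (what is proved, stated in full; the proofs are below) =====
def Claim_equal_sumMonth : Prop := ∀ (month : Int), Dom_sumMonth month → Spec_sumMonth month (sumMonth month)

-- ===== LEMMAS AND PROOFS =====

-- the arithmetic step of the closed form for sum of i//10 + i%10 over range(n)
theorem pvStepArith (n q r : Int) (hqr : n = 10 * q + r) (hr0 : 0 ≤ r) (hr9 : r < 10) :
    45 * ((n+1)/10) + 5 * ((n+1)/10) * ((n+1)/10 - 1) + ((n+1)/10) * ((n+1)%10)
      + ((n+1)%10) * ((n+1)%10 - 1) / 2
    = 45 * (n/10) + 5 * (n/10) * (n/10 - 1) + (n/10) * (n%10) + (n%10) * (n%10 - 1) / 2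
      + (n/10 + n%10) := by
  subst hqr
  rcases lt_or_ge r 9 with h9 | h9
  · have d1 : (10 * q + r) / 10 = q := by omega
    have d2 : (10 * q + r) % 10 = r := by omega
    have d3 : (10 * q + r + 1) / 10 = q := by omega
    have d4 : (10 * q + r + 1) % 10 = r + 1 := by omega
    simp only [d1, d2, d3, d4]
    obtain ⟨k, hk⟩ := Int.even_mul_succ_self (r - 1)
    have h1 : r * (r - 1) = k + k := by linear_combination hk
    have h2 : (r + 1) * (r + 1 - 1) = k + k + 2 * r := by linear_combination hk
    have e1 : r * (r - 1) / 2 = k := by rw [h1]; omega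
    have e2 : (r + 1) * (r + 1 - 1) / 2 = k + r := by rw [h2]; omega
    rw [e1, e2]; ring
  · have hr : r = 9 := by omega
    subst hr
    have d1 : (10 * q + 9) / 10 = q := by omega
    have d2 : (10 * q + 9) % 10 = 9 := by omega
    have d3 : (10 * q + 9 + 1) / 10 = q + 1 := by omega
    have d4 : (10 * q + 9 + 1) % 10 = 0 := by omega
    simp only [d1, d2, d3, d4]
    norm_num; ring

-- closed form for A's large-month loop body summed over range(n)
theorem pvLoopClosed (n : Int) (hn : 0 ≤ n) :
    (PySem.List.pyRange 0 n 1).foldl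
      (fun result i => result + (i / 10 + i % 10)) 0
    = 45 * (n/10) + 5 * (n/10) * (n/10 - 1) + (n/10) * (n%10) + (n%10) * (n%10 - 1) / 2 := by
  induction n, hn using Int.le_induction with
  | base => decide
  | succ n hn ih =>
    rw [PySem.List.pyRange_one_succ_right (by omega), List.foldl_append, ih]
    simp only [List.foldl]
    exact (pvStepArith n (n / 10) (n % 10) (by omega) (by omega) (by omega)).symm

theorem sumMonth_eq (month : Int) : sumMonth month = sumMonth_alt month := by
  unfold sumMonth sumMonth_alt
  by_cases h0 : month + 1 ≤ 0
  · simp only [h0, if_pos]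
    rw [PySem.List.pyRange_one_eq_nil (by omega)]
    rfl
  · simp only [h0, if_neg, not_false_iff]
    by_cases h10 : month + 1 < 10
    · simp only [h10, if_pos]
      have hlo : 0 ≤ month := by omega
      have hhi : month ≤ 8 := by omega
      interval_cases month <;> decide
    · simp only [h10, if_neg, not_false_iff,
        PySem.Int.floordiv_eq_ediv_of_pos (b := 10) (by norm_num : (0:Int) < 10),
        PySem.Int.mod_eq_emod_of_pos (b := 10) (by norm_num : (0:Int) < 10),
        PySem.Int.floordiv_eq_ediv_of_pos (b := 2) (by norm_num : (0:Int) < 2)]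
      exact pvLoopClosed (month + 1) (by omega)

-- ===== VERDICT (by name: the statement is the Claim_ definition above) =====
theorem sumMonth_spec : Claim_equal_sumMonth := by
  intro month _
  exact sumMonth_eq month
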